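-- pv_equiv track=rewrite | github.com/K0mp2t/BVA-BVMA | utils.py | compute_original_volume
-- ===== SOURCE A (Python) =====
-- def compute_original_volume(chosen_kws, cli_doc):
--     observed_each_doc_word_length = {}
--     observed_volume = {}
--
--     for kw_id in range(len(chosen_kws)):
--         observed_each_doc_word_length[kw_id] = 0
--         observed_volume[kw_id] = 0
--         for _, cli_doc_kws in enumerate(cli_doc):
--             if chosen_kws[kw_id] in cli_doc_kws:
--                 observed_each_doc_word_length[kw_id] += len(cli_doc_kws)
--                 observed_volume[kw_id] += 1
--     return observed_each_doc_word_length, observed_volume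
-- ===== SOURCE B (Python) =====
-- def compute_original_volume(chosen_kws, cli_doc):
--     # inverted index: keyword value -> list of kw_ids carrying that value
--     ids_by_kw = {}
--     for kw_id, kw in enumerate(chosen_kws):
--         ids_by_kw.setdefault(kw, []).append(kw_id)
--
--     observed_each_doc_word_length = {kw_id: 0 for kw_id in range(len(chosen_kws))}
--     observed_volume = {kw_id: 0 for kw_id in range(len(chosen_kws))}
--
--     for cli_doc_kws in cli_doc:
--         doc_len = len(cli_doc_kws)
--         for word in dict.fromkeys(cli_doc_kws):   # each distinct word once
--             for kw_id in ids_by_kw.get(word, ()):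
--                 observed_each_doc_word_length[kw_id] += doc_len
--                 observed_volume[kw_id] += 1
--     return observed_each_doc_word_length, observed_volume
-- ===== Notes on version B (the rewrite author's own statement) =====
-- stated objective: faster
-- what changed: Replaces the keyword-major nested scan (each keyword re-scans every document) by an inverted index from keyword value to kw_ids plus a single document-major pass that dedupes each document's words and bumps both counters for the matching ids.
import Mathlib
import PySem

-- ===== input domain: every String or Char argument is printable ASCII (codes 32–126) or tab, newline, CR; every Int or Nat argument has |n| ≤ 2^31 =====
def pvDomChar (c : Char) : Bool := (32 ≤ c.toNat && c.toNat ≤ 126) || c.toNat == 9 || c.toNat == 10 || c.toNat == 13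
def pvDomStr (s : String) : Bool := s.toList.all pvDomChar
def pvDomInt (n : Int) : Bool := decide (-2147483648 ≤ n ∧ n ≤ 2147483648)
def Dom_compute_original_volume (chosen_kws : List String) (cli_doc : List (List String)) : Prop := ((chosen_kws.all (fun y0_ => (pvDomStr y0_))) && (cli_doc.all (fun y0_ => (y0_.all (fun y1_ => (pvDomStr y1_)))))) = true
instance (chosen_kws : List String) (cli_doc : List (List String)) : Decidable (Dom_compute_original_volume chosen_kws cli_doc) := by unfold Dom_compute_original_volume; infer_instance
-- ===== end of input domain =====

-- B replaces A's keyword-major nested rescan by an inverted index (keyword value → kw_ids) and one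
-- document-major pass over deduplicated words (objective: faster, asymptotically fewer membership scans).

-- ===== PORT A =====
def compute_original_volume (chosen_kws : List String) (cli_doc : List (List String)) : (List (Int × Int)) × (List (Int × Int)) :=
  let st :=
    (PySem.List.pyRange 0 (PySem.List.len chosen_kws) 1).foldl
      (fun (st : PySem.Dict Int Int × PySem.Dict Int Int) kw_id =>
        cli_doc.foldl
          (fun st2 cli_doc_kws =>
            if cli_doc_kws.contains (PySem.List.pyGetD chosen_kws kw_id "") then
              (st2.1.modify kw_id 0 (· + PySem.List.len cli_doc_kws),
               st2.2.modify kw_id 0 (· + 1))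
            else st2)
          (st.1.insert kw_id 0, st.2.insert kw_id 0))
      (PySem.Dict.empty, PySem.Dict.empty)
  (st.1.items, st.2.items)

-- ===== PORT B =====
def compute_original_volume_alt (chosen_kws : List String) (cli_doc : List (List String)) : (List (Int × Int)) × (List (Int × Int)) :=
  -- ids_by_kw.setdefault(kw, []).append(kw_id)
  let ids_by_kw : PySem.Dict String (List Int) :=
    (PySem.List.enumerate chosen_kws 0).foldl
      (fun d p => d.modify p.2 [] (· ++ [p.1])) PySem.Dict.empty
  let lengths0 : PySem.Dict Int Int :=
    (PySem.List.pyRange 0 (PySem.List.len chosen_kws) 1).foldl (fun d i => d.insert i 0) PySem.Dict.empty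
  let volume0 : PySem.Dict Int Int :=
    (PySem.List.pyRange 0 (PySem.List.len chosen_kws) 1).foldl (fun d i => d.insert i 0) PySem.Dict.empty
  let st :=
    cli_doc.foldl
      (fun (st : PySem.Dict Int Int × PySem.Dict Int Int) cli_doc_kws =>
        let doc_len : Int := PySem.List.len cli_doc_kws
        (PySem.List.dedup cli_doc_kws).foldl
          (fun st word =>
            (ids_by_kw.getD word []).foldl
              (fun st kw_id => (st.1.modify kw_id 0 (· + doc_len), st.2.modify kw_id 0 (· + 1)))
              st)
          st)
      (lengths0, volume0)
  (st.1.items, st.2.items)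

-- ===== PRECONDITION & SPEC =====
def Spec_compute_original_volume (chosen_kws : List String) (cli_doc : List (List String)) (out : (List (Int × Int)) × (List (Int × Int))) : Prop := out = compute_original_volume_alt chosen_kws cli_doc
instance (chosen_kws : List String) (cli_doc : List (List String)) (out : (List (Int × Int)) × (List (Int × Int))) : Decidable (Spec_compute_original_volume chosen_kws cli_doc out) := by unfold Spec_compute_original_volume; infer_instance

-- ===== CLAIM (what is proved, stated in full; the proofs are below) =====
def Claim_equal_compute_original_volume : Prop := ∀ (chosen_kws : List String) (cli_doc : List (List String)), Dom_compute_original_volume chosen_kws cli_doc → Spec_compute_original_volume chosen_kws cli_doc (compute_original_volume chosen_kws cli_doc)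

-- ===== LEMMAS AND PROOFS =====

-- keyword of id x (as both ports look it up)
def pvKwAt (ck : List String) (x : Int) : String := PySem.List.pyGetD ck x ""

-- contribution of one document to counter id x, h = (length | constant 1)
def pvContrib (ck : List String) (h : List String → Int) (x : Int) (doc : List String) : Int :=
  if doc.contains (pvKwAt ck x) then h doc else 0

def pvTotal (ck : List String) (cd : List (List String)) (h : List String → Int) (x : Int) : Int :=
  (cd.map (pvContrib ck h x)).sum

-- canonical value both ports compute
def pvCanon (ck : List String) (cd : List (List String)) (h : List String → Int) : List (Int × Int) :=
  (PySem.List.pyRange 0 (PySem.List.len ck) 1).map (fun i => (i, pvTotal ck cd h i))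

-- ---- generic dict-fold lemmas ----

theorem pv_getD_foldCond (cd : List (List String)) (s : String) (k : Int) (h : List String → Int) :
    ∀ (d : PySem.Dict Int Int) (x : Int),
      (cd.foldl (fun d doc => if doc.contains s then d.modify k 0 (· + h doc) else d) d).getD x 0
        = d.getD x 0 + (if x = k then (cd.map (fun doc => if doc.contains s then h doc else 0)).sum else 0) := by
  induction cd with
  | nil => intro d x; simp
  | cons doc cd ih =>
    intro d x
    simp only [List.foldl_cons, List.map_cons, List.sum_cons]
    by_cases hc : doc.contains s
    · simp only [hc, if_true, ih, PySem.Dict.getD_modify]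
      by_cases hx : x = k <;> simp [hx] <;> ring
    · simp only [hc, if_false, ih]
      by_cases hx : x = k <;> simp [hx]

theorem pv_keys_foldCond (cd : List (List String)) (s : String) (k : Int) (h : List String → Int) :
    ∀ (d : PySem.Dict Int Int), d.contains k →
      (cd.foldl (fun d doc => if doc.contains s then d.modify k 0 (· + h doc) else d) d).keys = d.keys := by
  induction cd with
  | nil => intro d _; rfl
  | cons doc cd ih =>
    intro d hk
    simp only [List.foldl_cons]
    by_cases hc : doc.contains s
    · simp only [hc, if_true]
      rw [ih _ (by simp [PySem.Dict.contains_modify, hk]),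
          PySem.Dict.keys_modify, PySem.Dict.keys_insert_of_contains _ _ hk]
    · simp only [hc]; rw [if_neg (by simp [hc])]; exact ih d hk

theorem pv_getD_foldAdd (js : List Int) (L : Int) :
    ∀ (d : PySem.Dict Int Int) (x : Int),
      (js.foldl (fun d j => d.modify j 0 (· + L)) d).getD x 0 = d.getD x 0 + L * js.count x := by
  induction js with
  | nil => intro d x; simp
  | cons j js ih =>
    intro d x
    simp only [List.foldl_cons, ih, PySem.Dict.getD_modify, List.count_cons]
    by_cases hx : x = j
    · subst hx; simp; push_cast; ring
    · have hj : (j == x) = false := by simp [Ne.symm hx]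
      simp [hx, hj]

theorem pv_keys_foldAdd (js : List Int) (L : Int) :
    ∀ (d : PySem.Dict Int Int), (∀ j ∈ js, d.contains j) →
      (js.foldl (fun d j => d.modify j 0 (· + L)) d).keys = d.keys := by
  induction js with
  | nil => intro d _; rfl
  | cons j js ih =>
    intro d hj
    simp only [List.foldl_cons]
    have h1 : (d.modify j 0 (· + L)).keys = d.keys := by
      rw [PySem.Dict.keys_modify, PySem.Dict.keys_insert_of_contains _ _ (hj j (by simp))]
    rw [ih _ (fun j' hj' => by simp [PySem.Dict.contains_modify, hj j' (by simp [hj'])]), h1]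

-- index characterization
theorem pv_getD_foldIdx (l : List (Int × String)) :
    ∀ (d : PySem.Dict String (List Int)) (w : String),
      (l.foldl (fun d p => d.modify p.2 [] (· ++ [p.1])) d).getD w []
        = d.getD w [] ++ (l.filter (fun p => p.2 == w)).map (·.1) := by
  induction l with
  | nil => intro d w; simp
  | cons p l ih =>
    intro d w
    simp only [List.foldl_cons, ih, List.filter_cons]
    by_cases hw : p.2 = w
    · simp [hw, PySem.Dict.getD_modify]
    · have : (p.2 == w) = false := by simp [hw]
      simp [this, PySem.Dict.getD_modify, hw, Ne.symm hw]

def pvIds (ck : List String) (w : String) : List Int :=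
  (((PySem.List.enumerate ck 0).filter (fun p => p.2 == w)).map (·.1))

theorem pv_mem_pvIds (ck : List String) (w : String) (x : Int) :
    x ∈ pvIds ck w ↔ 0 ≤ x ∧ x < ck.length ∧ pvKwAt ck x = w := by
  simp only [pvIds, List.mem_map, List.mem_filter, PySem.List.mem_enumerate_iff]
  constructor
  · rintro ⟨p, ⟨⟨k, hk, rfl⟩, hw⟩, rfl⟩
    simp only [beq_iff_eq] at hw
    simp only [zero_add]
    refine ⟨Int.natCast_nonneg k, by exact_mod_cast hk, ?_⟩
    rw [pvKwAt, PySem.List.pyGetD_natCast]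
    simp [List.getD_eq_getElem?_getD, hk, hw]
  · rintro ⟨hx0, hxn, hkw⟩
    have hk : x.toNat < ck.length := by omega
    refine ⟨(x, ck[x.toNat]), ⟨⟨x.toNat, hk, by simp; omega⟩, ?_⟩, rfl⟩
    simp only [beq_iff_eq]
    rw [← hkw, pvKwAt, PySem.List.pyGetD_eq_getElem ck "" hx0 (by simpa using hxn)]

theorem pv_nodup_pvIds (ck : List String) (w : String) : (pvIds ck w).Nodup := by
  have h1 := PySem.List.pairwise_lt_enumerate ck 0
  have h2 := h1.filter (fun p => p.2 == w)
  exact (List.pairwise_map.mpr h2).imp (fun h => ne_of_lt h)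

theorem pv_count_pvIds (ck : List String) (w : String) (x : Int) :
    (pvIds ck w).count x = if 0 <= x ∧ x < ck.length ∧ pvKwAt ck x = w then 1 else 0 := by
  by_cases hm : x ∈ pvIds ck w
  · rw [if_pos ((pv_mem_pvIds ck w x).1 hm)]
    exact List.count_eq_one_of_mem (pv_nodup_pvIds ck w) hm
  · rw [if_neg (fun hc => hm ((pv_mem_pvIds ck w x).2 hc))]
    exact List.count_eq_zero_of_not_mem hm

theorem pv_sum_counts (ck : List String) (ws : List String) (hnd : ws.Nodup) (x : Int) :
    (ws.map (fun w => ((pvIds ck w).count x : Int))).sum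
      = if 0 <= x ∧ x < ck.length ∧ pvKwAt ck x ∈ ws then 1 else 0 := by
  induction ws with
  | nil => simp
  | cons w ws ih =>
    simp only [List.nodup_cons] at hnd
    rw [List.map_cons, List.sum_cons, pv_count_pvIds, ih hnd.2]
    have hns : pvKwAt ck x = w → pvKwAt ck x ∉ ws := fun hw => hw ▸ hnd.1
    simp only [List.mem_cons]
    push_cast
    by_cases hx : (0:Int) ≤ x ∧ x < ck.length
    · by_cases hw : pvKwAt ck x = w
      · rw [if_pos ⟨hx.1, hx.2, hw⟩, if_neg (fun hc => (hns hw) hc.2.2),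
          if_pos ⟨hx.1, hx.2, Or.inl hw⟩]
        norm_num
      · rw [if_neg (fun hc => hw hc.2.2)]
        by_cases hm : pvKwAt ck x ∈ ws
        · rw [if_pos ⟨hx.1, hx.2, hm⟩, if_pos ⟨hx.1, hx.2, Or.inr hm⟩]
          norm_num
        · rw [if_neg (by tauto), if_neg (by tauto)]
          norm_num
    · rw [if_neg (by tauto), if_neg (by tauto), if_neg (by tauto)]
      norm_num

-- ---- A-side invariant ----

def pvStepA (ck : List String) (cd : List (List String)) (h : List String → Int)
    (d : PySem.Dict Int Int) (kw_id : Int) : PySem.Dict Int Int :=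
  cd.foldl (fun d doc => if doc.contains (PySem.List.pyGetD ck kw_id "") then d.modify kw_id 0 (· + h doc) else d)
    (d.insert kw_id 0)

theorem pv_A_inv (ck : List String) (cd : List (List String)) (h : List String → Int) :
    ∀ (m : Nat), m ≤ ck.length →
      ((PySem.List.pyRange 0 (m : Int) 1).foldl (pvStepA ck cd h) PySem.Dict.empty).keys
          = PySem.List.pyRange 0 (m : Int) 1
        ∧ ∀ x : Int, ((PySem.List.pyRange 0 (m : Int) 1).foldl (pvStepA ck cd h) PySem.Dict.empty).getD x 0
          = if 0 ≤ x ∧ x < (m : Int) then pvTotal ck cd h x else 0 := by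
  intro m
  induction m with
  | zero =>
    intro _
    rw [PySem.List.pyRange_one_eq_nil (by norm_num)]
    constructor
    · rfl
    · intro x
      rw [if_neg (by omega)]
      exact PySem.Dict.getD_empty x 0
  | succ m ih =>
    intro hm
    obtain ⟨ihk, ihg⟩ := ih (by omega)
    have hcast : ((m + 1 : Nat) : Int) = (m : Int) + 1 := by push_cast; ring
    rw [hcast, PySem.List.pyRange_one_succ_right (by positivity), List.foldl_append,
      List.foldl_cons, List.foldl_nil]
    set d := (PySem.List.pyRange 0 (m : Int) 1).foldl (pvStepA ck cd h) PySem.Dict.empty with hd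
    have hnotc : d.contains (m : Int) = false := by
      by_contra hc
      have : d.contains (m : Int) = true := by revert hc; cases d.contains (m : Int) <;> simp
      have := (PySem.Dict.contains_iff_mem_keys d (m : Int)).1 this
      rw [ihk] at this
      have := PySem.List.mem_pyRange_one.1 this
      omega
    have hkeys1 : (d.insert (m : Int) (0 : Int)).keys = d.keys ++ [(m : Int)] :=
      PySem.Dict.keys_insert_of_not_contains d 0 hnotc
    constructor
    · show (pvStepA ck cd h d (m : Int)).keys = _
      unfold pvStepA
      rw [pv_keys_foldCond _ _ _ _ _ (by simp [PySem.Dict.contains_insert_self]),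
        hkeys1, ihk, ← PySem.List.pyRange_one_succ_right (by positivity)]
    · intro x
      show (pvStepA ck cd h d (m : Int)).getD x 0 = _
      unfold pvStepA
      rw [pv_getD_foldCond, PySem.Dict.getD_insert, ihg]
      by_cases hx : x = (m : Int)
      · subst hx
        rw [if_pos rfl, if_pos rfl, if_pos (by omega), zero_add]
        rfl
      · rw [if_neg hx, if_neg hx]
        by_cases hx2 : 0 ≤ x ∧ x < (m : Int)
        · rw [if_pos hx2, if_pos (by omega)]; ring
        · rw [if_neg hx2, if_neg (by omega)]; ring

-- ---- B-side ----

theorem pv_B_init (n : Nat) :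
    (((PySem.List.pyRange 0 (n : Int) 1).foldl (fun (d : PySem.Dict Int Int) i => d.insert i 0) PySem.Dict.empty).keys
        = PySem.List.pyRange 0 (n : Int) 1)
      ∧ ∀ x : Int, ((PySem.List.pyRange 0 (n : Int) 1).foldl (fun (d : PySem.Dict Int Int) i => d.insert i 0) PySem.Dict.empty).getD x 0 = 0 := by
  induction n with
  | zero =>
    rw [PySem.List.pyRange_one_eq_nil (by norm_num)]
    exact ⟨rfl, fun x => PySem.Dict.getD_empty x 0⟩
  | succ n ih =>
    obtain ⟨ihk, ihg⟩ := ih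
    have hcast : ((n + 1 : Nat) : Int) = (n : Int) + 1 := by push_cast; ring
    rw [hcast, PySem.List.pyRange_one_succ_right (by positivity), List.foldl_append,
      List.foldl_cons, List.foldl_nil]
    have hnotc : ((PySem.List.pyRange 0 (n : Int) 1).foldl (fun (d : PySem.Dict Int Int) i => d.insert i 0) PySem.Dict.empty).contains (n : Int) = false := by
      by_contra hc
      have h1 : ((PySem.List.pyRange 0 (n : Int) 1).foldl (fun (d : PySem.Dict Int Int) i => d.insert i 0) PySem.Dict.empty).contains (n : Int) = true := by
        revert hc; cases ((PySem.List.pyRange 0 (n : Int) 1).foldl (fun (d : PySem.Dict Int Int) i => d.insert i 0) PySem.Dict.empty).contains (n : Int) <;> simp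
      have h2 := (PySem.Dict.contains_iff_mem_keys _ (n : Int)).1 h1
      rw [ihk] at h2
      have := PySem.List.mem_pyRange_one.1 h2
      omega
    constructor
    · rw [PySem.Dict.keys_insert_of_not_contains _ 0 hnotc, ihk,
        ← PySem.List.pyRange_one_succ_right (by positivity)]
    · intro x
      rw [PySem.Dict.getD_insert, ihg]
      split_ifs <;> rfl

-- one document's pass, as a sum of id-counts
theorem pv_B_doc_sum (ck : List String) (L : Int) (ws : List String) :
    ∀ (d : PySem.Dict Int Int) (x : Int),
      (ws.foldl (fun d w => (pvIds ck w).foldl (fun d j => d.modify j 0 (· + L)) d) d).getD x 0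
        = d.getD x 0 + L * (ws.map (fun w => ((pvIds ck w).count x : Int))).sum := by
  induction ws with
  | nil => intro d x; simp
  | cons w ws ih =>
    intro d x
    simp only [List.foldl_cons, List.map_cons, List.sum_cons, ih, pv_getD_foldAdd]
    ring

theorem pv_B_doc_keys (ck : List String) (L : Int) (ws : List String) :
    ∀ (d : PySem.Dict Int Int), d.keys = PySem.List.pyRange 0 (ck.length : Int) 1 →
      (ws.foldl (fun d w => (pvIds ck w).foldl (fun d j => d.modify j 0 (· + L)) d) d).keys = d.keys := by
  induction ws with
  | nil => intro d _; rfl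
  | cons w ws ih =>
    intro d hk
    have hsub : ∀ j ∈ pvIds ck w, d.contains j = true := by
      intro j hj
      obtain ⟨h0, hn, _⟩ := (pv_mem_pvIds ck w j).1 hj
      rw [PySem.Dict.contains_iff_mem_keys, hk, PySem.List.mem_pyRange_one]
      omega
    simp only [List.foldl_cons]
    rw [ih _ (by rw [pv_keys_foldAdd _ _ _ hsub, hk]), pv_keys_foldAdd _ _ _ hsub]

-- the whole document-major pass
theorem pv_B_main (ck : List String) (a : List String → Int) (cd : List (List String)) :
    ∀ (d : PySem.Dict Int Int), d.keys = PySem.List.pyRange 0 (ck.length : Int) 1 →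
      ((cd.foldl (fun d doc => (PySem.List.dedup doc).foldl
          (fun d w => (pvIds ck w).foldl (fun d j => d.modify j 0 (· + a doc)) d) d) d).keys = d.keys)
      ∧ ∀ x : Int, (cd.foldl (fun d doc => (PySem.List.dedup doc).foldl
          (fun d w => (pvIds ck w).foldl (fun d j => d.modify j 0 (· + a doc)) d) d) d).getD x 0
        = d.getD x 0 + (cd.map (fun doc => if 0 ≤ x ∧ x < ck.length ∧ pvKwAt ck x ∈ doc then a doc else 0)).sum := by
  induction cd with
  | nil => intro d _; exact ⟨rfl, fun x => by simp⟩
  | cons doc cd ih =>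
    intro d hk
    have hk1 : ((PySem.List.dedup doc).foldl
        (fun d w => (pvIds ck w).foldl (fun d j => d.modify j 0 (· + a doc)) d) d).keys = d.keys :=
      pv_B_doc_keys ck (a doc) _ d hk
    obtain ⟨ihk, ihg⟩ := ih _ (hk1.trans hk)
    refine ⟨by simpa [List.foldl_cons] using ihk.trans hk1, fun x => ?_⟩
    simp only [List.foldl_cons, List.map_cons, List.sum_cons] at *
    rw [ihg x, pv_B_doc_sum, pv_sum_counts ck _ (PySem.List.nodup_dedup doc) x]
    have hmem : pvKwAt ck x ∈ PySem.List.dedup doc ↔ pvKwAt ck x ∈ doc := PySem.List.mem_dedup _ _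
    by_cases hc : 0 ≤ x ∧ x < ck.length ∧ pvKwAt ck x ∈ doc
    · rw [if_pos (by tauto), if_pos (by tauto)]; ring
    · rw [if_neg (by tauto), if_neg (by tauto)]; ring

-- splitting a loop over a pair of independent dictionaries
theorem pv_pair_fold {γ : Type} (f1 f2 : PySem.Dict Int Int → γ → PySem.Dict Int Int)
    (step : PySem.Dict Int Int × PySem.Dict Int Int → γ → PySem.Dict Int Int × PySem.Dict Int Int)
    (hstep : ∀ st e, step st e = (f1 st.1 e, f2 st.2 e)) :
    ∀ (l : List γ) (st : PySem.Dict Int Int × PySem.Dict Int Int),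
      l.foldl step st = (l.foldl f1 st.1, l.foldl f2 st.2) := by
  intro l
  induction l with
  | nil => intro st; rfl
  | cons e t ih =>
    intro st
    simp only [List.foldl_cons]
    rw [hstep, ih]

-- items of a dict with keys 0..n-1 and known values
theorem pv_items_canon (ck : List String) (cd : List (List String)) (h : List String → Int)
    (d : PySem.Dict Int Int) (hk : d.keys = PySem.List.pyRange 0 (ck.length : Int) 1)
    (hg : ∀ x : Int, d.getD x 0 = if 0 ≤ x ∧ x < (ck.length : Int) then pvTotal ck cd h x else 0) :
    d.items = pvCanon ck cd h := by
  rw [PySem.Dict.items_eq_map_keys d (by rw [hk]; exact PySem.List.nodup_pyRange_one 0 _) 0, hk]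
  unfold pvCanon
  simp only [PySem.List.len_eq]
  refine List.map_congr_left (fun k hkm => ?_)
  obtain ⟨h0, hn⟩ := PySem.List.mem_pyRange_one.1 hkm
  rw [hg k, if_pos ⟨h0, hn⟩]

theorem pv_sum_if (ck : List String) (cd : List (List String)) (a : List String → Int) (x : Int) :
    (cd.map (fun doc => if 0 ≤ x ∧ x < ck.length ∧ pvKwAt ck x ∈ doc then a doc else 0)).sum
      = if 0 ≤ x ∧ x < (ck.length : Int) then pvTotal ck cd a x else 0 := by
  by_cases hx : 0 ≤ x ∧ x < (ck.length : Int)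
  · rw [if_pos hx]
    unfold pvTotal
    refine congrArg List.sum (List.map_congr_left fun doc _ => ?_)
    by_cases hm : pvKwAt ck x ∈ doc
    · rw [if_pos ⟨hx.1, hx.2, hm⟩, pvContrib, if_pos (List.contains_iff_mem.mpr hm)]
    · rw [if_neg (by tauto), pvContrib,
        if_neg (by simp [List.contains_iff_mem, hm])]
  · rw [if_neg hx]
    refine List.sum_eq_zero fun y hy => ?_
    obtain ⟨doc, _, rfl⟩ := List.mem_map.1 hy
    rw [if_neg (by tauto)]

theorem pv_A_eq (ck : List String) (cd : List (List String)) :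
    compute_original_volume ck cd
      = (pvCanon ck cd (fun doc => (doc.length : Int)), pvCanon ck cd (fun _ => 1)) := by
  simp only [compute_original_volume, PySem.List.len_eq]
  have hstepIn : ∀ (kw_id : Int) (st2 : PySem.Dict Int Int × PySem.Dict Int Int) (doc : List String),
      (if doc.contains (PySem.List.pyGetD ck kw_id "") then
          (st2.1.modify kw_id 0 (· + (doc.length : Int)), st2.2.modify kw_id 0 (· + 1))
        else st2)
        = ((fun d doc => if doc.contains (PySem.List.pyGetD ck kw_id "") then d.modify kw_id 0 (· + (doc.length : Int)) else d) st2.1 doc,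
           (fun d doc => if doc.contains (PySem.List.pyGetD ck kw_id "") then d.modify kw_id 0 (· + 1) else d) st2.2 doc) := by
    intro kw_id st2 doc
    by_cases hc : doc.contains (PySem.List.pyGetD ck kw_id "") = true
    · rw [if_pos hc]; exact congrArg₂ Prod.mk (if_pos hc).symm (if_pos hc).symm
    · rw [if_neg hc]; exact congrArg₂ Prod.mk (if_neg hc).symm (if_neg hc).symm
  have hstepTop : ∀ (st : PySem.Dict Int Int × PySem.Dict Int Int) (kw_id : Int),
      cd.foldl (fun st2 doc =>
          if doc.contains (PySem.List.pyGetD ck kw_id "") then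
            (st2.1.modify kw_id 0 (· + (doc.length : Int)), st2.2.modify kw_id 0 (· + 1))
          else st2) (st.1.insert kw_id 0, st.2.insert kw_id 0)
        = (pvStepA ck cd (fun doc => (doc.length : Int)) st.1 kw_id, pvStepA ck cd (fun _ => 1) st.2 kw_id) := by
    intro st kw_id
    exact pv_pair_fold
      (fun d doc => if doc.contains (PySem.List.pyGetD ck kw_id "") then d.modify kw_id 0 (· + (doc.length : Int)) else d)
      (fun d doc => if doc.contains (PySem.List.pyGetD ck kw_id "") then d.modify kw_id 0 (· + 1) else d)
      _ (hstepIn kw_id) cd (st.1.insert kw_id 0, st.2.insert kw_id 0)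
  have hTop := pv_pair_fold _ _ _ hstepTop (PySem.List.pyRange 0 (ck.length : Int) 1) (PySem.Dict.empty, PySem.Dict.empty)
  rw [hTop]
  obtain ⟨hk1, hg1⟩ := pv_A_inv ck cd (fun doc => (doc.length : Int)) ck.length le_rfl
  obtain ⟨hk2, hg2⟩ := pv_A_inv ck cd (fun _ => 1) ck.length le_rfl
  rw [pv_items_canon ck cd _ _ hk1 hg1, pv_items_canon ck cd _ _ hk2 hg2]

theorem pv_B_eq (ck : List String) (cd : List (List String)) :
    compute_original_volume_alt ck cd
      = (pvCanon ck cd (fun doc => (doc.length : Int)), pvCanon ck cd (fun _ => 1)) := by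
  simp only [compute_original_volume_alt, PySem.List.len_eq]
  have hidx : ∀ w : String,
      ((PySem.List.enumerate ck 0).foldl (fun d p => d.modify p.2 [] (· ++ [p.1])) PySem.Dict.empty).getD w []
        = pvIds ck w := by
    intro w
    rw [pv_getD_foldIdx]
    simp [pvIds]
  simp only [hidx]
  have hIds : ∀ (L : Int) (js : List Int) (st : PySem.Dict Int Int × PySem.Dict Int Int),
      js.foldl (fun st j => (st.1.modify j 0 (· + L), st.2.modify j 0 (· + 1))) st
        = (js.foldl (fun d j => d.modify j 0 (· + L)) st.1, js.foldl (fun d j => d.modify j 0 (· + 1)) st.2) :=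
    fun L js st => pv_pair_fold (fun d j => d.modify j 0 (· + L)) (fun d j => d.modify j 0 (· + 1)) _ (fun _ _ => rfl) js st
  have hstepTop : ∀ (st : PySem.Dict Int Int × PySem.Dict Int Int) (doc : List String),
      (PySem.List.dedup doc).foldl (fun st w => (pvIds ck w).foldl
          (fun st j => (st.1.modify j 0 (· + (doc.length : Int)), st.2.modify j 0 (· + 1))) st) st
        = ((fun d doc => (PySem.List.dedup doc).foldl (fun d w => (pvIds ck w).foldl (fun d j => d.modify j 0 (· + (doc.length : Int))) d) d) st.1 doc,
           (fun d doc => (PySem.List.dedup doc).foldl (fun d w => (pvIds ck w).foldl (fun d j => d.modify j 0 (· + 1)) d) d) st.2 doc) := by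
    intro st doc
    exact pv_pair_fold
      (fun d w => (pvIds ck w).foldl (fun d j => d.modify j 0 (· + (doc.length : Int))) d)
      (fun d w => (pvIds ck w).foldl (fun d j => d.modify j 0 (· + 1)) d)
      _ (fun st w => hIds (doc.length : Int) (pvIds ck w) st) (PySem.List.dedup doc) st
  have hTop := pv_pair_fold
      (fun d doc => (PySem.List.dedup doc).foldl (fun d w => (pvIds ck w).foldl (fun d j => d.modify j 0 (· + (doc.length : Int))) d) d)
      (fun d doc => (PySem.List.dedup doc).foldl (fun d w => (pvIds ck w).foldl (fun d j => d.modify j 0 (· + 1)) d) d)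
      _ hstepTop cd
      ((PySem.List.pyRange 0 (ck.length : Int) 1).foldl (fun (d : PySem.Dict Int Int) i => d.insert i 0) PySem.Dict.empty,
       (PySem.List.pyRange 0 (ck.length : Int) 1).foldl (fun (d : PySem.Dict Int Int) i => d.insert i 0) PySem.Dict.empty)
  rw [hTop]
  obtain ⟨hik, hig⟩ := pv_B_init ck.length
  obtain ⟨hk1, hg1⟩ := pv_B_main ck (fun doc => (doc.length : Int)) cd _ hik
  obtain ⟨hk2, hg2⟩ := pv_B_main ck (fun _ => 1) cd _ hik
  rw [pv_items_canon ck cd _ _ (hk1.trans hik) (fun x => by rw [hg1 x, hig x, zero_add, pv_sum_if]),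
      pv_items_canon ck cd _ _ (hk2.trans hik) (fun x => by rw [hg2 x, hig x, zero_add, pv_sum_if])]

-- ===== VERDICT (by name: the statement is the Claim_ definition above) =====
theorem compute_original_volume_spec : Claim_equal_compute_original_volume := by
  intro ck cd _
  show compute_original_volume ck cd = compute_original_volume_alt ck cd
  rw [pv_A_eq, pv_B_eq]
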